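-- pv_equiv track=rewrite | github.com/cartwrightdj/E2CR | segment.py | _getLineBoundries
-- ===== SOURCE A (Python) =====
-- def _getLineBoundries(line):
--     """
--     Compute the minimum and maximum y-coordinates for a given line.
--
--     Args:
--         line (list of tuples): A line represented by a list of (y, x) points.
--
--     Returns:
--         tuple: Minimum and maximum y-coordinates of the line.
--     """
--     if not line:
--         raise ValueError("Line is empty")
--
--     min_y = min(y for y, x in line)
--     max_y = max(y for y, x in line)
--     min_x = min(x for y, x in line)
--     max_x = max(x for y, x in line)
--
--     return min_y, max_y
-- ===== SOURCE B (Python) =====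
-- def _getLineBoundries(line):
--     if not line:
--         raise ValueError("Line is empty")
--     ys = sorted(y for y, x in line)
--     return ys[0], ys[-1]
-- ===== Notes on version B (the rewrite author's own statement) =====
-- stated objective: alternative
-- what changed: Replaces four independent min/max comprehension scans (two over x whose results are discarded) with a sort of the y-coordinates, returning the first and last element of the sorted list.
import Mathlib
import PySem

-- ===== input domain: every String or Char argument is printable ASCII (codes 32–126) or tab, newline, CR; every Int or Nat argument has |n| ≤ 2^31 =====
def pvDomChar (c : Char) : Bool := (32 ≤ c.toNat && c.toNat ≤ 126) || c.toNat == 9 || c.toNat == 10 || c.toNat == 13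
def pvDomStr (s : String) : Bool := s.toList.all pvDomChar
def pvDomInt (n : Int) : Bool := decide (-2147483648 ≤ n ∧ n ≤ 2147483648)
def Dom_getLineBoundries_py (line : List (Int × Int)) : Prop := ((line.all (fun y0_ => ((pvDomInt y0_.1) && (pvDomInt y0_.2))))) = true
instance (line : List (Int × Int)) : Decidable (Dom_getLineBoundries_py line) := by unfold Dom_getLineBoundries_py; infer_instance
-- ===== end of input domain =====

-- B replaces A's four independent min/max scans (two over x, discarded) by sorting the
-- y-coordinates once and returning the first and last element of the sorted list.

-- ===== PORT A =====
-- A: four generator scans min/max over y and x; min_x/max_x computed and discarded.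
def getLineBoundries_py (line : List (Int × Int)) : Int × Int :=
  let min_y := PySem.List.min? (line.map (fun p => p.1)) (fun y => y)
  let max_y := PySem.List.max? (line.map (fun p => p.1)) (fun y => y)
  let _min_x := PySem.List.min? (line.map (fun p => p.2)) (fun x => x)
  let _max_x := PySem.List.max? (line.map (fun p => p.2)) (fun x => x)
  match min_y, max_y with
  | some mn, some mx => (mn, mx)
  | _, _ => (0, 0)   -- unreachable under Pre_ (Python raises ValueError on empty line)

-- ===== PORT B =====
-- B: ys = sorted(y for y, x in line); return ys[0], ys[-1]
def getLineBoundries_py_alt (line : List (Int × Int)) : Int × Int :=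
  let ys := PySem.List.sorted (line.map (fun p => p.1)) (fun y => y) false
  match PySem.List.pyGet? ys 0 with
  | none => (0, 0)   -- unreachable under Pre_ (Python raises ValueError on empty line)
  | some a =>
    match PySem.List.pyGet? ys (-1) with
    | none => (0, 0)   -- unreachable under Pre_
    | some b => (a, b)

-- ===== PRECONDITION & SPEC =====
-- Pre_: Python A raises ValueError on the empty list, so it is excluded.
def Pre_getLineBoundries_py (line : List (Int × Int)) : Prop := line ≠ []
instance (line : List (Int × Int)) : Decidable (Pre_getLineBoundries_py line) := by unfold Pre_getLineBoundries_py; infer_instance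
def pvWitness_getLineBoundries_py : (List (Int × Int)) := [(3, 1), (0, 2), (5, -4)]

def Spec_getLineBoundries_py (line : List (Int × Int)) (out : Int × Int) : Prop := out = getLineBoundries_py_alt line
instance (line : List (Int × Int)) (out : Int × Int) : Decidable (Spec_getLineBoundries_py line out) := by unfold Spec_getLineBoundries_py; infer_instance

-- ===== CLAIM =====
def Claim_equal_getLineBoundries_py : Prop := ∀ (line : List (Int × Int)), Dom_getLineBoundries_py line → Pre_getLineBoundries_py line → Spec_getLineBoundries_py line (getLineBoundries_py line)

-- ===== LEMMAS AND PROOFS =====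
lemma le_getLast_of_pairwise (l : List Int) (h : l.Pairwise (· ≤ ·)) (x : Int)
    (hx : x ∈ l) (hne : l ≠ []) : x ≤ l.getLast hne := by
  induction l with
  | nil => cases hx
  | cons a t ih =>
    cases t with
    | nil => simp at hx; simp [hx]
    | cons b t' =>
      rw [List.getLast_cons (by simp)]
      rcases List.mem_cons.mp hx with rfl | hx'
      · exact le_trans (List.rel_of_pairwise_cons h (List.getLast_mem _)) (le_refl _)
      · exact ih (List.Pairwise.of_cons h) hx' (by simp)

-- first/last element of sorted(y0 :: t) are the running min/max
lemma sorted_first_last (y0 : Int) (t : List Int) :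
    PySem.List.pyGet? (PySem.List.sorted (y0 :: t) (fun y => y) false) 0
      = some (t.foldl min y0) ∧
    PySem.List.pyGet? (PySem.List.sorted (y0 :: t) (fun y => y) false) (-1)
      = some (t.foldl max y0) := by
  have hsne : PySem.List.sorted (y0 :: t) (fun y => y) false ≠ [] := by
    intro h
    exact absurd ((PySem.List.sorted_eq_nil_iff _ _ _).mp h) (by simp)
  obtain ⟨m, tl, hcons⟩ := List.exists_cons_of_ne_nil hsne
  have hmemys : ∀ x : Int, x ∈ PySem.List.sorted (y0 :: t) (fun y => y) false ↔ x ∈ y0 :: t :=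
    PySem.List.mem_sorted (y0 :: t) (fun y => y) false
  -- min part
  have hfminmem : t.foldl min y0 ∈ y0 :: t := by
    rcases PySem.List.foldl_min_mem t y0 with h | h
    · rw [h]; exact List.mem_cons_self
    · exact List.mem_cons_of_mem _ h
  have hfminle : t.foldl min y0 ≤ y0 ∧ ∀ y ∈ t, t.foldl min y0 ≤ y :=
    PySem.List.foldl_min_le t y0
  have hm_le : m ≤ t.foldl min y0 :=
    PySem.List.key_head_sorted_le (y0 :: t) (fun y => y) hcons _ hfminmem
  have hle_m : t.foldl min y0 ≤ m := by
    have hmys : m ∈ y0 :: t := (hmemys m).mp (by rw [hcons]; exact List.mem_cons_self)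
    rcases List.mem_cons.mp hmys with rfl | h
    · exact hfminle.1
    · exact hfminle.2 _ h
  have hmin : m = t.foldl min y0 := le_antisymm hm_le hle_m
  constructor
  · rw [hcons, PySem.List.pyGet?_zero_cons, hmin]
  -- max part
  · have hfmaxmem : t.foldl max y0 ∈ y0 :: t := by
      rcases PySem.List.foldl_max_mem t y0 with h | h
      · rw [h]; exact List.mem_cons_self
      · exact List.mem_cons_of_mem _ h
    have hfmaxge : y0 ≤ t.foldl max y0 ∧ ∀ y ∈ t, y ≤ t.foldl max y0 :=
      PySem.List.le_foldl_max t y0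
    have hpw : (PySem.List.sorted (y0 :: t) (fun y => y) false).Pairwise (· ≤ ·) := by
      have := PySem.List.sorted_pairwise (xs := y0 :: t) (key := fun y => y)
      simpa using this
    have hlast_le : (PySem.List.sorted (y0 :: t) (fun y => y) false).getLast hsne ≤ t.foldl max y0 := by
      have hlys := (hmemys _).mp (List.getLast_mem hsne)
      rcases List.mem_cons.mp hlys with h | h
      · rw [h]; exact hfmaxge.1
      · exact hfmaxge.2 _ h
    have hle_last : t.foldl max y0 ≤ (PySem.List.sorted (y0 :: t) (fun y => y) false).getLast hsne :=
      le_getLast_of_pairwise _ hpw _ ((hmemys _).mpr hfmaxmem) hsne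
    rw [PySem.List.pyGet?_neg_one, List.getLast?_eq_some_getLast hsne,
        le_antisymm hlast_le hle_last]

theorem getLineBoundries_py_spec : Claim_equal_getLineBoundries_py := by
  intro line _ hpre
  unfold Spec_getLineBoundries_py getLineBoundries_py getLineBoundries_py_alt
  match line with
  | [] => exact absurd rfl hpre
  | (y0, x0) :: rest =>
    obtain ⟨h1, h2⟩ := sorted_first_last y0 (rest.map (fun p => p.1))
    simp only [List.map, PySem.List.min?_id_cons, PySem.List.max?_id_cons, h1, h2]
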